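-- pv_equiv track=rewrite | github.com/Raymon1213/Expermientacion2 | Graficos.py | min_eliminaciones_palindromos_tabular
-- ===== SOURCE A (Python) =====
-- def min_eliminaciones_palindromos_tabular(a):
--     n = len(a)
--     if n == 0:
--         return 0
--     dp = [[0]*n for _ in range(n)]
--
--     # Subarreglos de longitud 1
--     for i in range(n):
--         dp[i][i] = 1
--
--     # Longitudes crecientes
--     for length in range(2, n+1):
--         for l in range(0, n-length+1):
--             r = l + length - 1
--             res = 1 + dp[l+1][r]
--
--             # Caso palindrómico directo
--             if a[l] == a[r]:
--                 if l+1 <= r-1: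
--                     res = min(res, dp[l+1][r-1])
--                 else:
--                     res = 1
--
--             # División del subarreglo en dos partes
--             for k in range(l, r):
--                 res = min(res, dp[l][k] + dp[k+1][r])
--
--             dp[l][r] = res
--     return dp[0][n-1]
-- ===== SOURCE B (Python) =====
-- def min_eliminaciones_palindromos_tabular(a):
--     n = len(a)
--     if n == 0:
--         return 0
--     memo = {}
--
--     def solve(l, r):
--         if l > r:
--             return 0
--         if l == r:
--             return 1
--         if (l, r) in memo:
--             return memo[(l, r)]
--         res = 1 + solve(l + 1, r)
--         if a[l] == a[r]:
--             res = min(res, solve(l + 1, r - 1)) if l + 1 <= r - 1 else 1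
--         for k in range(l, r):
--             res = min(res, solve(l, k) + solve(k + 1, r))
--         memo[(l, r)] = res
--         return res
--
--     return solve(0, n - 1)
-- ===== Notes on version B (the rewrite author's own statement) =====
-- stated objective: alternative
-- what changed: Replaces the bottom-up length-ordered 2D table fill (mutated n x n list of lists) by a top-down memoized recursion solve(l, r) over nested subintervals with a dict cache.
import Mathlib
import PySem

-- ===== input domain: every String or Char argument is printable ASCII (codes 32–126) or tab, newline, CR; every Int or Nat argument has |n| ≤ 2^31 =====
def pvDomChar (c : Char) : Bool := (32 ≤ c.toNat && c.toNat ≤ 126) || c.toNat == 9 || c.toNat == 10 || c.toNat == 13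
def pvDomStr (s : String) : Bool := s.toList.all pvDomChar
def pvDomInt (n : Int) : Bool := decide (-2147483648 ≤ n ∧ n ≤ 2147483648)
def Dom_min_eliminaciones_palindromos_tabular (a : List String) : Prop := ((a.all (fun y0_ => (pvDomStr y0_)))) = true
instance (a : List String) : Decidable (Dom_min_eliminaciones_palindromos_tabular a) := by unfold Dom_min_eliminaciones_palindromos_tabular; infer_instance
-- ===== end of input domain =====

-- B replaces A's bottom-up length-ordered table fill by a top-down memoized recursion over subintervals (alternative decomposition, same result).

-- ===== PORT A =====
-- dp[i][j] reads/writes on the list-of-lists table (all actual accesses are in range)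
def pvGet2 (dp : List (List Int)) (i j : Nat) : Int := (dp.getD i []).getD j 0
def pvSet2 (dp : List (List Int)) (i j : Nat) (v : Int) : List (List Int) :=
  dp.set i ((dp.getD i []).set j v)

-- body of "for i in range(n): dp[i][i] = 1"
def pvInitStep (dp : List (List Int)) (i : Nat) : List (List Int) := pvSet2 dp i i 1

-- body of the "for l in range(0, n-length+1)" loop
def pvCellStep (a : List String) (len : Nat) (dp : List (List Int)) (l : Nat) : List (List Int) :=
  let r := l + len - 1
  let res := 1 + pvGet2 dp (l + 1) r
  let res := if a.getD l "" = a.getD r "" then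
      (if l + 1 ≤ r - 1 then min res (pvGet2 dp (l + 1) (r - 1)) else 1)
    else res
  let res := (List.range' l (r - l)).foldl
      (fun res k => min res (pvGet2 dp l k + pvGet2 dp (k + 1) r)) res
  pvSet2 dp l r res

-- body of the "for length in range(2, n+1)" loop
def pvLenStep (a : List String) (n : Nat) (dp : List (List Int)) (len : Nat) : List (List Int) :=
  (List.range (n - len + 1)).foldl (pvCellStep a len) dp

def min_eliminaciones_palindromos_tabular (a : List String) : Int :=
  let n := a.length
  if n = 0 then 0
  else
    let dp := List.replicate n (List.replicate n (0 : Int))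
    let dp := (List.range n).foldl pvInitStep dp
    let dp := (List.range' 2 (n - 1)).foldl (pvLenStep a n) dp
    pvGet2 dp 0 (n - 1)

-- ===== PORT B =====
-- solve(l, r) with the memo dict threaded through (returns the value and the updated memo)
def pvSolve (a : List String) (memo : PySem.Dict (Nat × Nat) Int) (l r : Nat) :
    Int × PySem.Dict (Nat × Nat) Int :=
  if h1 : r < l then (0, memo)
  else if h2 : l = r then (1, memo)
  else
    match memo.get? (l, r) with
    | some v => (v, memo)
    | none =>
      let s := pvSolve a memo (l + 1) r
      let res := 1 + s.1
      let p :=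
        if a.getD l "" = a.getD r "" then
          (if h3 : l + 1 ≤ r - 1 then
            let t := pvSolve a s.2 (l + 1) (r - 1)
            (min res t.1, t.2)
          else ((1 : Int), s.2))
        else (res, s.2)
      let q := (List.range' l (r - l)).attach.foldl
        (fun q k =>
          let u := pvSolve a q.2 l k.1
          let w := pvSolve a u.2 (k.1 + 1) r
          (min q.1 (u.1 + w.1), w.2)) p
      (q.1, q.2.insert (l, r) q.1)
termination_by r - l
decreasing_by
  · omega
  · omega
  · have := k.2; simp only [List.mem_range'_1] at this; omega
  · have := k.2; simp only [List.mem_range'_1] at this; omega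

def min_eliminaciones_palindromos_tabular_alt (a : List String) : Int :=
  let n := a.length
  if n = 0 then 0
  else (pvSolve a PySem.Dict.empty 0 (n - 1)).1

-- ===== PRECONDITION & SPEC =====
def Spec_min_eliminaciones_palindromos_tabular (a : List String) (out : Int) : Prop := out = min_eliminaciones_palindromos_tabular_alt a
instance (a : List String) (out : Int) : Decidable (Spec_min_eliminaciones_palindromos_tabular a out) := by unfold Spec_min_eliminaciones_palindromos_tabular; infer_instance

-- ===== CLAIM (what is proved, stated in full; the proofs are below) =====
def Claim_equal_min_eliminaciones_palindromos_tabular : Prop := ∀ (a : List String), Dom_min_eliminaciones_palindromos_tabular a → Spec_min_eliminaciones_palindromos_tabular a (min_eliminaciones_palindromos_tabular a)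

-- ===== LEMMAS AND PROOFS =====

-- the common mathematical value: the unmemoized interval recursion
def pvV (a : List String) (l r : Nat) : Int :=
  if h1 : r < l then 0
  else if h2 : l = r then 1
  else
    let res := 1 + pvV a (l + 1) r
    let res := if a.getD l "" = a.getD r "" then
        (if h3 : l + 1 ≤ r - 1 then min res (pvV a (l + 1) (r - 1)) else 1)
      else res
    (List.range' l (r - l)).attach.foldl
      (fun res k => min res (pvV a l k.1 + pvV a (k.1 + 1) r)) res
termination_by r - l
decreasing_by
  · omega
  · omega
  · have := k.2; simp only [List.mem_range'_1] at this; omega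
  · have := k.2; simp only [List.mem_range'_1] at this; omega

lemma pvV_diag (a : List String) (l : Nat) : pvV a l l = 1 := by
  rw [pvV]; simp

lemma pvV_step (a : List String) (l r : Nat) (h : l < r) :
    pvV a l r =
      (List.range' l (r - l)).foldl
        (fun res k => min res (pvV a l k + pvV a (k + 1) r))
        (if a.getD l "" = a.getD r "" then
           (if l + 1 ≤ r - 1 then min (1 + pvV a (l + 1) r) (pvV a (l + 1) (r - 1)) else 1)
         else 1 + pvV a (l + 1) r) := by
  rw [pvV]
  have h1 : ¬ r < l := by omega
  have h2 : ¬ l = r := by omega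
  simp only [h1, h2, dite_false]
  split_ifs <;> exact List.foldl_attach (f := fun res k => min res (pvV a l k + pvV a (k + 1) r))

-- B side: memo correctness ----------------------------------------------------
def pvGood (a : List String) (memo : PySem.Dict (Nat × Nat) Int) : Prop :=
  ∀ l r v, memo.get? (l, r) = some v → v = pvV a l r

lemma pvSolve_foldl (a : List String) (l r N : Nat)
    (IH : ∀ l' r' memo, r' - l' ≤ N → pvGood a memo →
      (pvSolve a memo l' r').1 = pvV a l' r' ∧ pvGood a (pvSolve a memo l' r').2) :
    ∀ ks : List Nat, (∀ k ∈ ks, l ≤ k ∧ k < r ∧ k - l ≤ N ∧ r - (k + 1) ≤ N) →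
    ∀ p : Int × PySem.Dict (Nat × Nat) Int, pvGood a p.2 →
      (ks.foldl (fun q k =>
          let u := pvSolve a q.2 l k
          let w := pvSolve a u.2 (k + 1) r
          (min q.1 (u.1 + w.1), w.2)) p).1
        = ks.foldl (fun res k => min res (pvV a l k + pvV a (k + 1) r)) p.1
      ∧ pvGood a ((ks.foldl (fun q k =>
          let u := pvSolve a q.2 l k
          let w := pvSolve a u.2 (k + 1) r
          (min q.1 (u.1 + w.1), w.2)) p).2) := by
  intro ks
  induction ks with
  | nil => intro _ p hp; exact ⟨rfl, hp⟩
  | cons k ks ih =>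
    intro hks p hp
    have hk := hks k (by simp)
    have hu := IH l k p.2 (by omega) hp
    have hw := IH (k + 1) r (pvSolve a p.2 l k).2 (by omega) hu.2
    have := ih (fun k hk => hks k (by simp [hk])) 
      (min p.1 ((pvSolve a p.2 l k).1 + (pvSolve a (pvSolve a p.2 l k).2 (k + 1) r).1),
        (pvSolve a (pvSolve a p.2 l k).2 (k + 1) r).2) hw.2
    simpa [List.foldl_cons, hu.1, hw.1] using this

lemma pvSolve_correct (a : List String) :
    ∀ N l r memo, r - l ≤ N → pvGood a memo →
      (pvSolve a memo l r).1 = pvV a l r ∧ pvGood a (pvSolve a memo l r).2 := by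
  intro N
  induction N with
  | zero =>
    intro l r memo hN hg
    rw [pvSolve]
    by_cases h1 : r < l
    · simp only [dif_pos h1]
      exact ⟨by rw [pvV]; simp [h1], hg⟩
    · have h2 : l = r := by omega
      simp only [dif_neg h1, dif_pos h2]
      exact ⟨by subst h2; rw [pvV_diag], hg⟩
  | succ N ih =>
    intro l r memo hN hg
    rw [pvSolve]
    by_cases h1 : r < l
    · simp only [dif_pos h1]
      exact ⟨by rw [pvV]; simp [h1], hg⟩
    by_cases h2 : l = r
    · simp only [dif_neg h1, dif_pos h2]
      exact ⟨by subst h2; rw [pvV_diag], hg⟩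
    simp only [dif_neg h1, dif_neg h2]
    have hlr : l < r := by omega
    cases hmm : memo.get? (l, r) with
    | some v =>
      exact ⟨hg l r v hmm, hg⟩
    | none =>
      -- the first recursive call
      have hs := ih (l + 1) r memo (by omega) hg
      -- the initial accumulator p
      have hp : ((if a.getD l "" = a.getD r "" then
            (if h3 : l + 1 ≤ r - 1 then
              (min (1 + (pvSolve a memo (l + 1) r).1)
                   (pvSolve a (pvSolve a memo (l + 1) r).2 (l + 1) (r - 1)).1,
               (pvSolve a (pvSolve a memo (l + 1) r).2 (l + 1) (r - 1)).2)
            else ((1 : Int), (pvSolve a memo (l + 1) r).2))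
          else (1 + (pvSolve a memo (l + 1) r).1, (pvSolve a memo (l + 1) r).2) :
            Int × PySem.Dict (Nat × Nat) Int)).1
          = (if a.getD l "" = a.getD r "" then
              (if l + 1 ≤ r - 1 then min (1 + pvV a (l + 1) r) (pvV a (l + 1) (r - 1)) else 1)
             else 1 + pvV a (l + 1) r)
          ∧ pvGood a ((if a.getD l "" = a.getD r "" then
            (if h3 : l + 1 ≤ r - 1 then
              (min (1 + (pvSolve a memo (l + 1) r).1)
                   (pvSolve a (pvSolve a memo (l + 1) r).2 (l + 1) (r - 1)).1,
               (pvSolve a (pvSolve a memo (l + 1) r).2 (l + 1) (r - 1)).2)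
            else ((1 : Int), (pvSolve a memo (l + 1) r).2))
          else (1 + (pvSolve a memo (l + 1) r).1, (pvSolve a memo (l + 1) r).2) :
            Int × PySem.Dict (Nat × Nat) Int)).2 := by
        by_cases hpal : a.getD l "" = a.getD r ""
        · by_cases h3 : l + 1 ≤ r - 1
          · have ht := ih (l + 1) (r - 1) (pvSolve a memo (l + 1) r).2 (by omega) hs.2
            simp only [if_pos hpal, dif_pos h3, if_pos h3]
            exact ⟨by rw [hs.1, ht.1], ht.2⟩
          · simp only [if_pos hpal, dif_neg h3, if_neg h3]
            exact ⟨by simp, hs.2⟩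
        · simp only [if_neg hpal]
          exact ⟨by rw [hs.1], hs.2⟩
      -- the k-loop
      have hfold := pvSolve_foldl a l r N ih (List.range' l (r - l))
        (by intro k hk; rw [List.mem_range'_1] at hk; exact ⟨by omega, by omega, by omega, by omega⟩)
      rw [List.foldl_attach (f := fun (q : Int × PySem.Dict (Nat × Nat) Int) (k : Nat) =>
        (min q.1 ((pvSolve a q.2 l k).1 + (pvSolve a (pvSolve a q.2 l k).2 (k + 1) r).1),
         (pvSolve a (pvSolve a q.2 l k).2 (k + 1) r).2))]
      set p := (if a.getD l "" = a.getD r "" then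
            (if h3 : l + 1 ≤ r - 1 then
              (min (1 + (pvSolve a memo (l + 1) r).1)
                   (pvSolve a (pvSolve a memo (l + 1) r).2 (l + 1) (r - 1)).1,
               (pvSolve a (pvSolve a memo (l + 1) r).2 (l + 1) (r - 1)).2)
            else ((1 : Int), (pvSolve a memo (l + 1) r).2))
          else (1 + (pvSolve a memo (l + 1) r).1, (pvSolve a memo (l + 1) r).2) :
            Int × PySem.Dict (Nat × Nat) Int) with hpdef
      obtain ⟨hq1, hq2⟩ := hfold p hp.2
      constructor
      · dsimp only
        rw [hq1, hp.1, ← pvV_step a l r hlr]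
      · dsimp only
        intro l' r' v' hget
        rw [PySem.Dict.get?_insert] at hget
        by_cases hkey : (l', r') = (l, r)
        · rw [if_pos hkey] at hget
          have hv' : v' = _ := (Option.some_injective _ hget).symm
          have : l' = l ∧ r' = r := by
            constructor <;> [exact congrArg Prod.fst hkey; exact congrArg Prod.snd hkey]
          rw [this.1, this.2, hv', hq1, hp.1, ← pvV_step a l r hlr]
        · rw [if_neg hkey] at hget
          exact hq2 l' r' v' hget

-- A side: table invariant ------------------------------------------------------
def pvDims (dp : List (List Int)) (n : Nat) : Prop :=
  dp.length = n ∧ ∀ row ∈ dp, row.length = n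

lemma pvGetD_set_self {α : Type} (l : List α) (i : Nat) (x d : α) (h : i < l.length) :
    (l.set i x).getD i d = x := by
  rw [List.getD_eq_getElem?_getD, List.getElem?_set_self h, Option.getD_some]

lemma pvGetD_set_ne {α : Type} (l : List α) (i j : Nat) (x d : α) (h : i ≠ j) :
    (l.set i x).getD j d = l.getD j d := by
  rw [List.getD_eq_getElem?_getD, List.getElem?_set_ne h, ← List.getD_eq_getElem?_getD]

lemma pvGetDRow {dp : List (List Int)} {n i : Nat} (h : pvDims dp n) (hi : i < n) :
    (dp.getD i []).length = n := by
  have hlen : i < dp.length := by rw [h.1]; exact hi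
  rw [List.getD_eq_getElem?_getD, List.getElem?_eq_getElem hlen]
  exact h.2 _ (List.getElem_mem hlen)

lemma pvDims_set2 {dp : List (List Int)} {n i j : Nat} {v : Int}
    (h : pvDims dp n) (hi : i < n) : pvDims (pvSet2 dp i j v) n := by
  refine ⟨by simpa [pvSet2] using h.1, ?_⟩
  intro row hrow
  rcases List.mem_or_eq_of_mem_set hrow with h' | h'
  · exact h.2 row h'
  · subst h'; rw [List.length_set]; exact pvGetDRow h hi

lemma pvGet2_set2_self {dp : List (List Int)} {n i j : Nat} {v : Int}
    (h : pvDims dp n) (hi : i < n) (hj : j < n) :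
    pvGet2 (pvSet2 dp i j v) i j = v := by
  have hlen : i < dp.length := by rw [h.1]; exact hi
  have hrow : (dp.getD i []).length = n := pvGetDRow h hi
  unfold pvGet2 pvSet2
  rw [pvGetD_set_self _ _ _ _ hlen, pvGetD_set_self _ _ _ _ (by omega)]

lemma pvGet2_set2_ne {dp : List (List Int)} {i j i' j' : Nat} {v : Int}
    (h : i' ≠ i ∨ j' ≠ j) : pvGet2 (pvSet2 dp i j v) i' j' = pvGet2 dp i' j' := by
  unfold pvGet2 pvSet2
  by_cases hii : i' = i
  · subst hii
    have hj : j' ≠ j := h.resolve_left (by simp)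
    by_cases hlen : i' < dp.length
    · rw [pvGetD_set_self _ _ _ _ hlen, pvGetD_set_ne _ _ _ _ _ (Ne.symm hj)]
    · rw [List.set_eq_of_length_le (by omega)]
  · rw [pvGetD_set_ne _ _ _ _ _ (Ne.symm hii)]

def pvInv (a : List String) (n : Nat) (dp : List (List Int)) (L : Nat) : Prop :=
  pvDims dp n ∧ ∀ l r, l ≤ r → r < n → r - l < L → pvGet2 dp l r = pvV a l r

lemma pvInit (n : Nat) :
    ∀ (m : Nat) (dp : List (List Int)), m ≤ n → pvDims dp n →
      pvDims ((List.range m).foldl pvInitStep dp) n ∧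
      ∀ i j, pvGet2 ((List.range m).foldl pvInitStep dp) i j
          = if i = j ∧ i < m ∧ i < n then 1 else pvGet2 dp i j := by
  intro m
  induction m with
  | zero => intro dp _ h; simpa using h
  | succ m ih =>
    intro dp hm h
    obtain ⟨hd, hv⟩ := ih dp (by omega) h
    rw [List.range_succ, List.foldl_append, List.foldl_cons, List.foldl_nil]
    simp only [pvInitStep]
    refine ⟨pvDims_set2 hd (by omega), ?_⟩
    intro i j
    by_cases hij : i = j ∧ i < m + 1 ∧ i < n
    · obtain ⟨rfl, him, hin⟩ := hij
      by_cases hie : i = m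
      · subst hie
        rw [pvGet2_set2_self (n := n) hd hin hin]; simp [hin]
      · rw [pvGet2_set2_ne (Or.inl hie), hv]
        have c1 : i = i ∧ i < m ∧ i < n := ⟨rfl, by omega, hin⟩
        have c2 : i = i ∧ i < m + 1 ∧ i < n := ⟨rfl, him, hin⟩
        rw [if_pos c1, if_pos c2]
    · have hne : i ≠ m ∨ j ≠ m := by
        by_contra hc
        push_neg at hc
        exact hij ⟨by omega, by omega, by omega⟩
      rw [pvGet2_set2_ne hne, hv, if_neg (fun hc => hij ⟨hc.1, by omega, hc.2.2⟩), if_neg hij]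

lemma pvCellRes (a : List String) (n len l : Nat) (dp : List (List Int))
    (h2 : 2 ≤ len) (hl : l + len ≤ n)
    (H : ∀ l' r', l' ≤ r' → r' < n → r' - l' < len - 1 → pvGet2 dp l' r' = pvV a l' r') :
    (List.range' l (l + len - 1 - l)).foldl
        (fun res k => min res (pvGet2 dp l k + pvGet2 dp (k + 1) (l + len - 1)))
        (if a.getD l "" = a.getD (l + len - 1) "" then
           (if l + 1 ≤ l + len - 1 - 1 then
              min (1 + pvGet2 dp (l + 1) (l + len - 1)) (pvGet2 dp (l + 1) (l + len - 1 - 1))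
            else 1)
         else 1 + pvGet2 dp (l + 1) (l + len - 1))
      = pvV a l (l + len - 1) := by
  have hlr : l < l + len - 1 := by omega
  have hrn : l + len - 1 < n := by omega
  rw [pvV_step a l (l + len - 1) hlr]
  have hcongr : ∀ init : Int,
      (List.range' l (l + len - 1 - l)).foldl
        (fun res k => min res (pvGet2 dp l k + pvGet2 dp (k + 1) (l + len - 1))) init
      = (List.range' l (l + len - 1 - l)).foldl
        (fun res k => min res (pvV a l k + pvV a (k + 1) (l + len - 1))) init := by
    intro init
    apply PySem.List.foldl_congr_mem
    intro acc k hk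
    rw [List.mem_range'_1] at hk
    rw [H l k (by omega) (by omega) (by omega),
      H (k + 1) (l + len - 1) (by omega) hrn (by omega)]
  have hg1 : pvGet2 dp (l + 1) (l + len - 1) = pvV a (l + 1) (l + len - 1) :=
    H _ _ (by omega) hrn (by omega)
  by_cases hpal : a.getD l "" = a.getD (l + len - 1) ""
  · by_cases h3 : l + 1 ≤ l + len - 1 - 1
    · have hg2 : pvGet2 dp (l + 1) (l + len - 1 - 1) = pvV a (l + 1) (l + len - 1 - 1) :=
        H _ _ h3 (by omega) (by omega)
      rw [if_pos hpal, if_pos hpal, if_pos h3, if_pos h3, hg1, hg2, hcongr]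
    · rw [if_pos hpal, if_pos hpal, if_neg h3, if_neg h3, hcongr]
  · rw [if_neg hpal, if_neg hpal, hg1, hcongr]

lemma pvInner (a : List String) (n len : Nat) (h2 : 2 ≤ len) (hn : len ≤ n) :
    ∀ dp, pvInv a n dp (len - 1) → pvInv a n (pvLenStep a n dp len) len := by
  intro dp hInv
  have key : ∀ m, m ≤ n - len + 1 →
      pvDims ((List.range m).foldl (pvCellStep a len) dp) n ∧
      (∀ l r, l ≤ r → r < n → (r - l < len - 1 ∨ (r + 1 = l + len ∧ l < m)) →
        pvGet2 ((List.range m).foldl (pvCellStep a len) dp) l r = pvV a l r) := by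
    intro m
    induction m with
    | zero =>
      intro _
      refine ⟨hInv.1, ?_⟩
      intro l r hlr hrn hc
      exact hInv.2 l r hlr hrn (by omega)
    | succ m ih =>
      intro hm
      obtain ⟨hd, hv⟩ := ih (by omega)
      rw [List.range_succ, List.foldl_append, List.foldl_cons, List.foldl_nil]
      simp only [pvCellStep]
      have hres := pvCellRes a n len m (List.foldl (pvCellStep a len) dp (List.range m))
        h2 (by omega) (fun l' r' h1' h2' h3' => hv l' r' h1' h2' (Or.inl h3'))
      refine ⟨pvDims_set2 hd (by omega), ?_⟩
      intro l r hlr hrn hc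
      by_cases he : l = m ∧ r = m + len - 1
      · obtain ⟨rfl, rfl⟩ := he
        rw [pvGet2_set2_self (n := n) hd (by omega) (by omega)]
        exact hres
      · have hne : l ≠ m ∨ r ≠ m + len - 1 := by tauto
        rw [pvGet2_set2_ne hne]
        apply hv l r hlr hrn
        rcases hc with hc | hc
        · exact Or.inl hc
        · right
          refine ⟨hc.1, ?_⟩
          rcases hne with hne | hne
          · omega
          · omega
  have hfin := key (n - len + 1) le_rfl
  refine ⟨hfin.1, ?_⟩
  intro l r hlr hrn hL
  apply hfin.2 l r hlr hrn
  by_cases hc : r - l < len - 1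
  · exact Or.inl hc
  · exact Or.inr ⟨by omega, by omega⟩

lemma pvOuter (a : List String) (n : Nat) :
    ∀ (cnt s : Nat) (dp : List (List Int)), 2 ≤ s → s + cnt ≤ n + 1 →
      pvInv a n dp (s - 1) →
      pvInv a n ((List.range' s cnt).foldl (pvLenStep a n) dp) (s + cnt - 1) := by
  intro cnt
  induction cnt with
  | zero =>
    intro s dp hs hsn hInv
    simpa using hInv
  | succ cnt ih =>
    intro s dp hs hsn hInv
    rw [List.range'_succ, List.foldl_cons]
    have h1 : pvInv a n (pvLenStep a n dp s) s :=
      pvInner a n s hs (by omega) dp hInv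
    have h2 := ih (s + 1) (pvLenStep a n dp s) (by omega) (by omega) (by simpa using h1)
    have he : s + 1 + cnt - 1 = s + (cnt + 1) - 1 := by omega
    rwa [he] at h2

-- ===== VERDICT (by name: the statement is the Claim_ definition above) =====
theorem min_eliminaciones_palindromos_tabular_spec : Claim_equal_min_eliminaciones_palindromos_tabular := by
  intro a _
  unfold Spec_min_eliminaciones_palindromos_tabular
  unfold min_eliminaciones_palindromos_tabular min_eliminaciones_palindromos_tabular_alt
  by_cases hn : a.length = 0
  · simp [hn]
  · simp only [hn, if_false]
    have hpos : 1 ≤ a.length := by omega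
    -- A side: the final table agrees with pvV
    have hdims0 : pvDims (List.replicate a.length (List.replicate a.length (0 : Int))) a.length := by
      refine ⟨by simp, ?_⟩
      intro row hrow
      rw [List.eq_of_mem_replicate hrow]
      simp
    have hinit := pvInit a.length a.length
      (List.replicate a.length (List.replicate a.length (0 : Int))) le_rfl hdims0
    have hInv1 : pvInv a a.length
        ((List.range a.length).foldl pvInitStep
          (List.replicate a.length (List.replicate a.length (0 : Int)))) 1 := by
      refine ⟨hinit.1, ?_⟩
      intro l r hlr hrn hL
      have : l = r := by omega
      subst this
      rw [hinit.2 l l, if_pos ⟨rfl, hrn, hrn⟩, pvV_diag]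
    have hout := pvOuter a a.length (a.length - 1) 2
      ((List.range a.length).foldl pvInitStep
        (List.replicate a.length (List.replicate a.length (0 : Int))))
      le_rfl (by omega) (by simpa using hInv1)
    have hA : pvGet2 ((List.range' 2 (a.length - 1)).foldl (pvLenStep a a.length)
        ((List.range a.length).foldl pvInitStep
          (List.replicate a.length (List.replicate a.length (0 : Int))))) 0 (a.length - 1)
        = pvV a 0 (a.length - 1) :=
      hout.2 0 (a.length - 1) (by omega) (by omega) (by omega)
    -- B side
    have hgood : pvGood a PySem.Dict.empty := by
      intro l r v hget
      rw [PySem.Dict.get?_empty] at hget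
      exact absurd hget (by simp)
    have hB := pvSolve_correct a (a.length - 1) 0 (a.length - 1) PySem.Dict.empty
      (by omega) hgood
    rw [hA, ← hB.1]
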